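-- pv_equiv track=rewrite | github.com/poojaelkal/LeetCode-solutions | #728_selfDividingNumbers.py | selfDividingNumbers
-- ===== SOURCE A (Python) =====
-- from typing import List
--
-- def selfDividingNumbers(left: int, right: int) -> List[int]:
--     res = []
--     for i in range(left, right+1):
--         if '0' in str(i):
--             continue
--         divided = 0
--         for j in str(i):
--             if i%int(j) != 0:
--                 divided = 1
--         if divided == 0:
--             res.append(i)
--     return res
-- ===== SOURCE B (Python) =====
-- def _self_dividing(i):
--     if i <= 0:
--         return False
--     n = i
--     while n:
--         d = n % 10
--         if d == 0 or i % d != 0: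
--             return False
--         n //= 10
--     return True
--
-- def selfDividingNumbers(left, right):
--     return [i for i in range(left, right + 1) if _self_dividing(i)]
-- ===== Notes on version B (the rewrite author's own statement) =====
-- stated objective: alternative
-- what changed: Replaces A's string conversion and flag-accumulating inner scan (str(i), '0' in str, int(j), a 'divided' flag over all characters) by a purely arithmetic early-exit digit-extraction predicate (d = n % 10, n //= 10) used to filter the range with a comprehension.
-- outside the precondition, e.g. on selfDividingNumbers(-10, -10): A returns [], B returns []
import Mathlib
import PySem

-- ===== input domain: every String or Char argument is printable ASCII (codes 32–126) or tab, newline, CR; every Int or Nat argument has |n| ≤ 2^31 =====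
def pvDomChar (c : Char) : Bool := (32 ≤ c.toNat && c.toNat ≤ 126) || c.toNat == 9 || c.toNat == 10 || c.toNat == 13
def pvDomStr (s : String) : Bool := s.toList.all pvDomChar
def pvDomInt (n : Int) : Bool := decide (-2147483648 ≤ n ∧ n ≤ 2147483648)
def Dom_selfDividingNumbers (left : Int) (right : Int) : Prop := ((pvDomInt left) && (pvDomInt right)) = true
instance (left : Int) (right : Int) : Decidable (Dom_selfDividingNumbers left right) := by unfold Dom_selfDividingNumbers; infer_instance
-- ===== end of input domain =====

-- B replaces A's string-based digit test (str(i), '0' in str, int(j)) by an arithmetic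
-- digit-extraction predicate (% 10 // 10 with early exit) used to filter the range.

-- ===== PORT A =====
def selfDividingNumbers (left : Int) (right : Int) : List Int :=
  (PySem.List.pyRange left (right + 1) 1).foldl (fun res i =>
    if PySem.Str.isIn "0" (PySem.Int.toStr i) then res
    else
      let divided : Int :=
        (PySem.Int.toStr i).toList.foldl (fun divided j =>
          if PySem.Int.mod i ((PySem.Int.ofChars? [j]).getD 0) ≠ 0 then 1 else divided) 0
      if divided = 0 then res ++ [i] else res) []

-- ===== PORT B =====
-- while-loop of _self_dividing; the final 'else false' arm is a totality guard only:
-- it is reached only for n < 0, which the guard i > 0 of pvSelfDividing makes unreachable.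
def pvSdLoop (i : Int) (n : Int) : Bool :=
  if n = 0 then true
  else
    let d := PySem.Int.mod n 10
    if d = 0 ∨ PySem.Int.mod i d ≠ 0 then false
    else if _h : 0 < n then pvSdLoop i (PySem.Int.floordiv n 10) else false
termination_by n.toNat
decreasing_by
  rw [PySem.Int.floordiv_eq_ediv_of_pos (by norm_num)]; omega

def pvSelfDividing (i : Int) : Bool :=
  if i ≤ 0 then false else pvSdLoop i i

def selfDividingNumbers_alt (left : Int) (right : Int) : List Int :=
  (PySem.List.pyRange left (right + 1) 1).filter pvSelfDividing

-- ===== PRECONDITION & SPEC =====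
-- Pre_ excludes nonempty ranges starting below 0: on any negative i without a digit '0'
-- A raises ValueError at int('-'); on the few all-zero-digit negative ranges where A does
-- return, it returns [] (as does B) and Pre_ is narrower than its reason there.
def Pre_selfDividingNumbers (left : Int) (right : Int) : Prop := 0 ≤ left ∨ right < left
instance (left : Int) (right : Int) : Decidable (Pre_selfDividingNumbers left right) := by
  unfold Pre_selfDividingNumbers; infer_instance

def pvWitness_selfDividingNumbers : Int × Int := (1, 22)

def Spec_selfDividingNumbers (left : Int) (right : Int) (out : List Int) : Prop := out = selfDividingNumbers_alt left right
instance (left : Int) (right : Int) (out : List Int) : Decidable (Spec_selfDividingNumbers left right out) := by unfold Spec_selfDividingNumbers; infer_instance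

-- ===== CLAIM (what is proved, stated in full; the proofs are below) =====
def Claim_equal_selfDividingNumbers : Prop := ∀ (left : Int) (right : Int), Dom_selfDividingNumbers left right → Pre_selfDividingNumbers left right → Spec_selfDividingNumbers left right (selfDividingNumbers left right)

-- ===== LEMMAS AND PROOFS =====

-- str(m) for m > 0 is the base-10 digits of m, most significant first.
lemma pvToDigitsCore_eq (f : Nat) : ∀ (n : Nat) (l : List Char), 0 < n → n ≤ f →
    Nat.toDigitsCore 10 f n l = ((Nat.digits 10 n).map Nat.digitChar).reverse ++ l := by
  induction f with
  | zero => intro n l hn hf; omega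
  | succ f ih =>
    intro n l hn hf
    rw [Nat.toDigitsCore]
    rw [Nat.digits_def' (by norm_num : (1:Nat) < 10) hn]
    by_cases h : n / 10 = 0
    · simp [h, Nat.digits_zero]
    · have hlt : n / 10 < n := Nat.div_lt_self hn (by norm_num)
      simp only [h, if_false]
      rw [ih (n / 10) _ (Nat.pos_of_ne_zero h) (by omega)]
      simp

lemma pvToChars_pos (m : Nat) (hm : 0 < m) :
    PySem.Int.toChars (m : Int) = ((Nat.digits 10 m).map Nat.digitChar).reverse := by
  have : ¬ ((m : Int) < 0) := by omega
  simp only [PySem.Int.toChars, this, if_false, Int.toNat_natCast]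
  rw [Nat.toDigits, pvToDigitsCore_eq (m + 1) m [] hm (by omega)]
  simp

lemma pvDigitChar_eq_zero_iff (d : Nat) (hd : d < 10) : Nat.digitChar d = '0' ↔ d = 0 := by
  interval_cases d <;> simp <;> decide

lemma pvOfChars_digitChar (d : Nat) (hd : d < 10) :
    PySem.Int.ofChars? [Nat.digitChar d] = some (d : Int) := by
  interval_cases d <;> decide

-- A's inner flag loop: the flag stays 0 iff every character's digit divides i.
lemma pvFlag_eq_zero (i : Int) (l : List Char) (a : Int) :
    (l.foldl (fun divided j =>
      if PySem.Int.mod i ((PySem.Int.ofChars? [j]).getD 0) ≠ 0 then 1 else divided) a = 0)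
    ↔ (a = 0 ∧ ∀ c ∈ l, PySem.Int.mod i ((PySem.Int.ofChars? [c]).getD 0) = 0) := by
  induction l generalizing a with
  | nil => simp
  | cons c l ih =>
    simp only [List.foldl_cons, ih, List.mem_cons]
    by_cases h : PySem.Int.mod i ((PySem.Int.ofChars? [c]).getD 0) = 0
    · simp [h]
    · simp [h]

-- B's while loop characterised by the base-10 digits.
lemma pvSdLoop_iff (m : Nat) (i : Int) (hm : 0 < m) :
    pvSdLoop i (m : Int) = true ↔
      ∀ d ∈ Nat.digits 10 m, d ≠ 0 ∧ PySem.Int.mod i (d : Int) = 0 := by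
  induction m using Nat.strong_induction_on with
  | _ m ih =>
    rw [pvSdLoop]
    have hm0 : ¬ ((m : Int) = 0) := by omega
    have hmod : PySem.Int.mod (m : Int) 10 = ((m % 10 : Nat) : Int) := by simp
    have hdiv : PySem.Int.floordiv (m : Int) 10 = ((m / 10 : Nat) : Int) := by simp
    have hpos : (0 : Int) < m := by exact_mod_cast hm
    rw [Nat.digits_def' (by norm_num : (1:Nat) < 10) hm]
    rw [if_neg hm0]
    simp only [hmod, hdiv, dif_pos hpos, List.mem_cons]
    by_cases h : ((m % 10 : Nat) : Int) = 0 ∨ PySem.Int.mod i ((m % 10 : Nat) : Int) ≠ 0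
    · simp only [h, if_true]
      constructor
      · intro hc; exact absurd hc (by simp)
      · intro hall
        rcases hall (m % 10) (Or.inl rfl) with ⟨h1, h2⟩
        rcases h with h | h
        · exact absurd (by exact_mod_cast h) h1
        · exact absurd h2 h
    · simp only [h, if_false]
      simp only [not_or, ne_eq, not_not] at h
      by_cases hq : m / 10 = 0
      · rw [hq]
        have hz : pvSdLoop i ((0 : Nat) : Int) = true := by
          rw [pvSdLoop]; norm_num
        rw [hz]
        simp only [true_iff]
        intro d hd
        rcases hd with hd | hd
        · subst hd; exact ⟨by exact_mod_cast h.1, h.2⟩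
        · simp [Nat.digits_zero] at hd
      · rw [ih (m / 10) (Nat.div_lt_self hm (by norm_num)) (Nat.pos_of_ne_zero hq)]
        constructor
        · intro hall d hd
          rcases hd with hd | hd
          · subst hd; exact ⟨by exact_mod_cast h.1, h.2⟩
          · exact hall d hd
        · intro hall d hd; exact hall d (Or.inr hd)

-- the per-element equivalence: A's body condition equals B's predicate for 0 ≤ i
lemma pvBody_eq (i : Int) (hi : 0 ≤ i) (acc : List Int) :
    (if PySem.Str.isIn "0" (PySem.Int.toStr i) then acc
     else
       let divided : Int :=
         (PySem.Int.toStr i).toList.foldl (fun divided j =>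
           if PySem.Int.mod i ((PySem.Int.ofChars? [j]).getD 0) ≠ 0 then 1 else divided) 0
       if divided = 0 then acc ++ [i] else acc)
    = (if pvSelfDividing i then acc ++ [i] else acc) := by
  rcases eq_or_lt_of_le hi with hz | hpos
  · subst hz
    have h1 : PySem.Str.isIn "0" (PySem.Int.toStr (0 : Int)) = true := by decide
    have h2 : pvSelfDividing (0 : Int) = false := by
      unfold pvSelfDividing; rw [if_pos le_rfl]
    rw [if_pos h1, h2]
    simp only [Bool.false_eq_true, if_false]
  · -- i > 0
    obtain ⟨m, rfl⟩ : ∃ m : Nat, i = (m : Int) := ⟨i.toNat, (Int.toNat_of_nonneg hi).symm⟩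
    have hm : 0 < m := by exact_mod_cast hpos
    have hchars : (PySem.Int.toStr (m : Int)).toList
        = ((Nat.digits 10 m).map Nat.digitChar).reverse := by
      rw [PySem.Int.toList_toStr, pvToChars_pos m hm]
    have hlt : ∀ d ∈ Nat.digits 10 m, d < 10 :=
      fun d hd => Nat.digits_lt_base (by norm_num) hd
    have hIn : PySem.Str.isIn "0" (PySem.Int.toStr (m : Int)) = true ↔ 0 ∈ Nat.digits 10 m := by
      rw [show PySem.Str.isIn "0" (PySem.Int.toStr (m : Int))
            = PySem.Chars.isIn "0".toList (PySem.Int.toStr (m : Int)).toList from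
          PySem.Str.isIn_eq _ _]
      rw [PySem.Chars.isIn_iff_infix]
      show ['0'] <:+: _ ↔ _
      rw [List.singleton_infix_iff, hchars, List.mem_reverse, List.mem_map]
      constructor
      · rintro ⟨d, hd, hdc⟩
        have := (pvDigitChar_eq_zero_iff d (hlt d hd)).mp hdc
        rwa [this] at hd
      · intro h0; exact ⟨0, h0, rfl⟩
    have hsd : pvSelfDividing (m : Int) = pvSdLoop (m : Int) (m : Int) := by
      unfold pvSelfDividing
      rw [if_neg (by omega)]
    by_cases hz : 0 ∈ Nat.digits 10 m
    · -- '0' in str(i): A skips; B returns false because the digit 0 fails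
      rw [if_pos (hIn.mpr hz), hsd]
      have hf : pvSdLoop (m : Int) (m : Int) = false := by
        cases hc : pvSdLoop (m : Int) (m : Int)
        · rfl
        · rw [pvSdLoop_iff m (m : Int) hm] at hc
          exact absurd rfl (hc 0 hz).1
      rw [hf]
      simp only [Bool.false_eq_true, if_false]
    · rw [if_neg (by rw [hIn]; exact hz), hsd]
      have hflag := pvFlag_eq_zero (m : Int) (PySem.Int.toStr (m : Int)).toList 0
      have hloop := pvSdLoop_iff m (m : Int) hm
      have hcond : ((PySem.Int.toStr (m : Int)).toList.foldl (fun divided j =>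
            if PySem.Int.mod (m : Int) ((PySem.Int.ofChars? [j]).getD 0) ≠ 0 then 1 else divided)
            (0:Int) = 0)
          ↔ pvSdLoop (m : Int) (m : Int) = true := by
        rw [hflag, hloop]
        constructor
        · rintro ⟨-, hall⟩ d hd
          refine ⟨fun h0 => hz (h0 ▸ hd), ?_⟩
          have hc : Nat.digitChar d ∈ (PySem.Int.toStr (m : Int)).toList := by
            rw [hchars, List.mem_reverse]; exact List.mem_map_of_mem hd
          have := hall _ hc
          rwa [pvOfChars_digitChar d (hlt d hd), Option.getD_some] at this
        · intro hall
          refine ⟨rfl, fun c hc => ?_⟩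
          rw [hchars, List.mem_reverse, List.mem_map] at hc
          rcases hc with ⟨d, hd, rfl⟩
          rw [pvOfChars_digitChar d (hlt d hd), Option.getD_some]
          exact (hall d hd).2
      by_cases hb : pvSdLoop (m : Int) (m : Int) = true
      · simp only [hb, if_pos (hcond.mpr hb), if_true]
      · rw [if_neg (fun h => hb (hcond.mp h))]
        have hb' : pvSdLoop (m : Int) (m : Int) = false := by
          cases hc : pvSdLoop (m : Int) (m : Int)
          · rfl
          · exact absurd hc hb
        rw [hb']
        simp only [Bool.false_eq_true, if_false]

lemma pvFoldl_eq_filter (l : List Int) (acc : List Int) (h : ∀ i ∈ l, 0 ≤ i) :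
    l.foldl (fun res i =>
      if PySem.Str.isIn "0" (PySem.Int.toStr i) then res
      else
        let divided : Int :=
          (PySem.Int.toStr i).toList.foldl (fun divided j =>
            if PySem.Int.mod i ((PySem.Int.ofChars? [j]).getD 0) ≠ 0 then 1 else divided) 0
        if divided = 0 then res ++ [i] else res) acc
    = acc ++ l.filter pvSelfDividing := by
  induction l generalizing acc with
  | nil => simp
  | cons x l ih =>
    simp only [List.foldl_cons, List.filter_cons]
    rw [pvBody_eq x (h x (List.mem_cons_self)) acc]
    cases hx : pvSelfDividing x
    · simp only [Bool.false_eq_true, if_false]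
      exact ih _ (fun i hi => h i (List.mem_cons_of_mem _ hi))
    · simp only [if_true]
      rw [ih _ (fun i hi => h i (List.mem_cons_of_mem _ hi))]
      simp

-- ===== VERDICT (by name: the statement is the Claim_ definition above) =====
theorem selfDividingNumbers_spec : Claim_equal_selfDividingNumbers := by
  intro left right _ hpre
  unfold Spec_selfDividingNumbers selfDividingNumbers selfDividingNumbers_alt
  rcases hpre with hl | hr
  · exact pvFoldl_eq_filter _ [] (fun i hi => by
      have := (PySem.List.mem_pyRange_one).mp hi
      omega)
  · rw [PySem.List.pyRange_one_eq_nil (by omega)]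
    simp
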